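-- pv_equiv track=rewrite | github.com/thegeek-sys/uni | FP/EXAMS/25-10-23_solved/program.py | aux_1
-- ===== SOURCE A (Python) =====
-- def aux_1(cur, a_set, n, l=1):
--     rez = set()
--
--     if n == l:
--         return cur
--     else:
--         for i in cur:
--             for j in a_set:
--                 if not j in i:
--                     rez.add(j+i)
--         rez = aux_1(rez, a_set, n, l+1)
--     return rez
-- ===== SOURCE B (Python) =====
-- def aux_1(cur, a_set, n, l=1):
--     while l != n:
--         cur = {j + i for i in cur for j in a_set if j not in i}
--         l += 1
--     return cur
-- ===== Notes on version B (the rewrite author's own statement) =====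
-- stated objective: simpler
-- what changed: Replaces the tail recursion with an explicit while-loop that rebuilds the working set each level via a set comprehension, with no recursive call or accumulator threading.
import Mathlib
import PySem

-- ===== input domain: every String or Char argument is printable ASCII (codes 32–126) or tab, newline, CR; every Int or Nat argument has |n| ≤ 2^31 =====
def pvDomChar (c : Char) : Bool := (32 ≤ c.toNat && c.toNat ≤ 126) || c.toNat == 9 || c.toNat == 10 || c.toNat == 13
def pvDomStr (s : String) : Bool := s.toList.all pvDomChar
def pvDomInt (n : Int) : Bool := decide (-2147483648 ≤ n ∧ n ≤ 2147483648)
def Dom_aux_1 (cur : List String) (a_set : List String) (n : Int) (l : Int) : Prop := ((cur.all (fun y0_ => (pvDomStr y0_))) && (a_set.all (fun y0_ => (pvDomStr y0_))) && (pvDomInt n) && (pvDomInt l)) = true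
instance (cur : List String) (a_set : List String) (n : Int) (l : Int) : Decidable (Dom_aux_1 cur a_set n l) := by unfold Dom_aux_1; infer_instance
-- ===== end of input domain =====

-- B replaces A's tail recursion by an explicit while-loop building each level with a
-- set comprehension (objective: simpler). Return-value equivalence only; neither mutates.

-- ===== PORT A =====
-- A's recursion: fuel = (n - l).toNat counts the remaining levels; A diverges
-- (RecursionError) when l > n, which Pre_aux_1 excludes, so fuel 0 is only a totaliser.
def aux1GoA : Nat → List String → List String → Int → Int → List String
  | fuel, cur, a_set, n, l =>
    -- rez = set(); for i in cur: for j in a_set: if not j in i: rez.add(j+i)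
    let rez : List String :=
      cur.foldl (fun rez i =>
        a_set.foldl (fun rez j =>
          if PySem.Str.isIn j i then rez else PySem.Set.add rez (j ++ i)) rez) PySem.Set.empty
    if n = l then cur
    else match fuel with
      | 0 => cur
      | fuel' + 1 => aux1GoA fuel' rez a_set n (l + 1)

def aux_1 (cur : List String) (a_set : List String) (n : Int) (l : Int) : List String :=
  aux1GoA (n - l).toNat cur a_set n l

-- ===== PORT B =====
-- {j + i for i in cur for j in a_set if j not in i}
def aux1StepB (cur : List String) (a_set : List String) : List String :=
  PySem.Set.ofList (cur.flatMap (fun i =>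
    (a_set.filter (fun j => !PySem.Str.isIn j i)).map (fun j => j ++ i)))

-- while l != n: cur = {…}; l += 1   (fuel-bounded; the loop only runs when l < n)
def aux1GoB : Nat → List String → List String → Int → Int → List String
  | 0, cur, _, _, _ => cur
  | fuel + 1, cur, a_set, n, l =>
    if l ≠ n then aux1GoB fuel (aux1StepB cur a_set) a_set n (l + 1) else cur

def aux_1_alt (cur : List String) (a_set : List String) (n : Int) (l : Int) : List String :=
  aux1GoB (n - l).toNat cur a_set n l

-- ===== PRECONDITION & SPEC =====
-- Pre_ excludes l > n, where Python A recurses forever past l = n and raises RecursionError.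
def Pre_aux_1 (cur : List String) (a_set : List String) (n : Int) (l : Int) : Prop := l ≤ n
instance (cur : List String) (a_set : List String) (n : Int) (l : Int) : Decidable (Pre_aux_1 cur a_set n l) := by unfold Pre_aux_1; infer_instance
def pvWitness_aux_1 : List String × List String × Int × Int := (["a"], ["b"], 2, 1)

def Spec_aux_1 (cur : List String) (a_set : List String) (n : Int) (l : Int) (out : List String) : Prop := out = aux_1_alt cur a_set n l
instance (cur : List String) (a_set : List String) (n : Int) (l : Int) (out : List String) : Decidable (Spec_aux_1 cur a_set n l out) := by unfold Spec_aux_1; infer_instance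

-- ===== CLAIM (what is proved, stated in full; the proofs are below) =====
def Claim_equal_aux_1 : Prop := ∀ (cur : List String) (a_set : List String) (n : Int) (l : Int), Dom_aux_1 cur a_set n l → Pre_aux_1 cur a_set n l → Spec_aux_1 cur a_set n l (aux_1 cur a_set n l)

-- ===== LEMMAS AND PROOFS =====

-- a conditional-add loop is a fold of Set.add over the filtered-mapped list
theorem foldl_if_add (p : String → Bool) (f : String → String) (xs : List String) (s : List String) :
    xs.foldl (fun rez j => if p j then rez else PySem.Set.add rez (f j)) s
      = ((xs.filter (fun j => !p j)).map f).foldl PySem.Set.add s := by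
  induction xs generalizing s with
  | nil => rfl
  | cons j rest ih =>
      cases h : p j <;> simp [h, ih]

-- A's nested loops compute exactly B's comprehension step
theorem aux1_step_fold (cur a_set : List String) (s : List String) :
    cur.foldl (fun rez i =>
        a_set.foldl (fun rez j =>
          if PySem.Str.isIn j i then rez else PySem.Set.add rez (j ++ i)) rez) s
      = (cur.flatMap (fun i =>
          (a_set.filter (fun j => !PySem.Str.isIn j i)).map (fun j => j ++ i))).foldl PySem.Set.add s := by
  induction cur generalizing s with
  | nil => rfl
  | cons i rest ih =>
      simp only [List.foldl_cons, List.flatMap_cons, List.foldl_append]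
      rw [foldl_if_add, ih]

theorem aux1_step_eq (cur a_set : List String) :
    cur.foldl (fun rez i =>
        a_set.foldl (fun rez j =>
          if PySem.Str.isIn j i then rez else PySem.Set.add rez (j ++ i)) rez) PySem.Set.empty
      = aux1StepB cur a_set := by
  unfold aux1StepB
  rw [PySem.Set.ofList_eq_foldl]
  exact aux1_step_fold cur a_set PySem.Set.empty

theorem aux1_go_eq (fuel : Nat) (cur a_set : List String) (n l : Int) :
    aux1GoA fuel cur a_set n l = aux1GoB fuel cur a_set n l := by
  induction fuel generalizing cur l with
  | zero =>
      rw [aux1GoA, aux1GoB]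
      split <;> rfl
  | succ f ih =>
      rw [aux1GoA, aux1GoB]
      by_cases h : n = l
      · simp [h]
      · simp only [h, if_false]
        rw [aux1_step_eq, ih]
        exact (if_pos (fun e => h e.symm)).symm

-- ===== VERDICT (by name: the statement is the Claim_ definition above) =====
theorem aux_1_spec : Claim_equal_aux_1 := by
  intro cur a_set n l _ _
  unfold Spec_aux_1 aux_1 aux_1_alt
  exact aux1_go_eq _ cur a_set n l
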